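-- pv_equiv track=rewrite | github.com/virujthakur/LeetCode-Daily-Challenges | 08_Nov_2024_1829_Maximum_XOR_for_Each_Query.py | getMaximumXor
-- ===== SOURCE A (Python) =====
-- from typing import List
--
-- def getMaximumXor(nums: List[int], maximumBit: int) -> List[int]:
--     n = len(nums)
--
--     bitCnt = [0 for _ in range(maximumBit)]
--
--     for i in range(maximumBit):
--         cnt = 0
--         for j in range(n):
--             if (1<<i) & nums[j]:
--                 cnt+=1
--
--             bitCnt[i] = cnt
--
--     res = []
--
--
--     for i in range(n):
--         ans = 0
--         for j in range(maximumBit):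
--             if bitCnt[j] % 2:
--                 continue
--             else:
--                 ans |= (1<< j)
--
--         for j in range(maximumBit):
--             if nums[n-1-i] & (1<<j):
--                 bitCnt[j] -=1
--
--         res.append(ans)
--
--     return res
-- ===== SOURCE B (Python) =====
-- from typing import List
--
-- def getMaximumXor(nums: List[int], maximumBit: int) -> List[int]:
--     mask = (1 << maximumBit) - 1 if maximumBit > 0 else 0
--     x = 0
--     for v in nums:
--         x ^= v
--     res = []
--     for v in reversed(nums):
--         res.append(~x & mask)
--         x ^= v
--     return res
-- ===== Notes on version B (the rewrite author's own statement) =====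
-- stated objective: faster
-- what changed: Replaces the per-bit counting table (maximumBit*n counting passes plus a maximumBit-wide parity scan and decrement pass per query) with a single running prefix XOR: the answer for each query is the complement of the running XOR under the mask, and the last element is XORed out per query.
import Mathlib
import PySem

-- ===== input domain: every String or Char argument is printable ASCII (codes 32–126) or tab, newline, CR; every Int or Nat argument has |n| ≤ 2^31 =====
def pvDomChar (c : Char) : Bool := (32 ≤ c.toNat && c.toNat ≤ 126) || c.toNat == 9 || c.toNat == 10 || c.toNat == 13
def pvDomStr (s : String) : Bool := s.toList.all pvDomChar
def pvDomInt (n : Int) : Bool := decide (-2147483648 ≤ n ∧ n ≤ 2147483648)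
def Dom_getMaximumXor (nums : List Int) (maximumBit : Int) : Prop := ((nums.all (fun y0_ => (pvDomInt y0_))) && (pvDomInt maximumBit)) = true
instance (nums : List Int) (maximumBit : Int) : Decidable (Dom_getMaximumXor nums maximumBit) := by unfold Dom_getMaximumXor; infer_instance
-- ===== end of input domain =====

-- B replaces A's per-bit counting table (O(n*maximumBit)) by a single running prefix XOR
-- complemented under the mask (objective: faster, asymptotic change).

-- ===== PORT A =====
-- first loop nest of A: builds bitCnt (bitCnt[i] = cnt is re-assigned inside the j-loop, as in A)
def pvA_phase1 (nums : List Int) (maximumBit : Int) : List Int :=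
  let n : Int := (nums.length : Int)
  let bitCnt : List Int := (PySem.List.pyRange 0 maximumBit).map (fun _ => (0 : Int))
  (PySem.List.pyRange 0 maximumBit).foldl (fun bc i =>
    ((PySem.List.pyRange 0 n).foldl (fun (p : Int × List Int) j =>
      let cnt := if PySem.Int.band ((1 : Int) <<< i.toNat) (PySem.List.pyGetD nums j 0) ≠ 0
                 then p.1 + 1 else p.1
      (cnt, p.2.set i.toNat cnt)) ((0 : Int), bc)).2) bitCnt

-- A's per-query answer loop (`ans |= 1 << j` for every bit with even count)
def pvA_ans (bc : List Int) (maximumBit : Int) : Int :=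
  (PySem.List.pyRange 0 maximumBit).foldl (fun ans j =>
    if PySem.Int.mod (PySem.List.pyGetD bc j 0) 2 ≠ 0 then ans
    else PySem.Int.bor ans ((1 : Int) <<< j.toNat)) 0

-- A's per-query decrement loop (`bitCnt[j] -= 1` for every bit set in the removed element)
def pvA_decr (bc : List Int) (v : Int) (maximumBit : Int) : List Int :=
  (PySem.List.pyRange 0 maximumBit).foldl (fun bc j =>
    if PySem.Int.band v ((1 : Int) <<< j.toNat) ≠ 0
    then bc.set j.toNat (PySem.List.pyGetD bc j 0 - 1) else bc) bc

def getMaximumXor (nums : List Int) (maximumBit : Int) : List Int :=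
  let n : Int := (nums.length : Int)
  ((PySem.List.pyRange 0 n).foldl (fun (st : List Int × List Int) i =>
    (pvA_decr st.1 (PySem.List.pyGetD nums (n - 1 - i) 0) maximumBit,
     st.2 ++ [pvA_ans st.1 maximumBit])) (pvA_phase1 nums maximumBit, [])).2

-- ===== PORT B =====
def getMaximumXor_alt (nums : List Int) (maximumBit : Int) : List Int :=
  let mask : Int := if 0 < maximumBit then ((1 : Int) <<< maximumBit.toNat) - 1 else 0
  let x : Int := nums.foldl (fun a v => PySem.Int.bxor a v) 0
  (nums.reverse.foldl (fun (st : Int × List Int) v =>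
    (PySem.Int.bxor st.1 v, st.2 ++ [PySem.Int.band (Int.not st.1) mask])) (x, [])).2

-- ===== PRECONDITION & SPEC =====
def Spec_getMaximumXor (nums : List Int) (maximumBit : Int) (out : List Int) : Prop := out = getMaximumXor_alt nums maximumBit
instance (nums : List Int) (maximumBit : Int) (out : List Int) : Decidable (Spec_getMaximumXor nums maximumBit out) := by unfold Spec_getMaximumXor; infer_instance

-- ===== CLAIM (what is proved, stated in full; the proofs are below) =====
def Claim_equal_getMaximumXor : Prop := ∀ (nums : List Int) (maximumBit : Int), Dom_getMaximumXor nums maximumBit → Spec_getMaximumXor nums maximumBit (getMaximumXor nums maximumBit)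

-- ===== LEMMAS AND PROOFS =====

-- common abbreviations for the proof
def pvXorAll (l : List Int) : Int := l.foldl PySem.Int.bxor 0
def pvCnt (l : List Int) (j : Nat) : Nat := l.countP (fun v => v.testBit j)
def pvPrefCnt (l : List Int) (t : Nat) : List Int := (List.range t).map (fun j => ((pvCnt l j : Nat) : Int))
def pvAnsOf (l : List Int) (t : Nat) : Int := Int.not (pvXorAll l) % (2 : Int) ^ t
def pvSpecList (nums : List Int) (t : Nat) : List Int :=
  (List.range nums.length).map (fun i => pvAnsOf (nums.take (nums.length - i)) t)

-- ---- elementary bit facts ----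

lemma pvShl (t : Nat) : (1 : Int) <<< t = ((2 ^ t : Nat) : Int) := by
  rw [Int.shiftLeft_eq, one_mul]
  push_cast
  ring

lemma pvTbCast (n : Nat) (j : Nat) : ((n : Int)).testBit j = n.testBit j := rfl

lemma pvOfNat (n : Nat) : Int.ofNat n = (n : Int) := rfl

lemma pvNotEq (x : Int) : Int.not x = Int.lnot x := by cases x <;> rfl

lemma pvTbNot (x : Int) (j : Nat) : (Int.not x).testBit j = !x.testBit j := by
  rw [pvNotEq, Int.testBit_lnot]

lemma pvIntExt (a b : Int) (h : ∀ j, a.testBit j = b.testBit j) : a = b := by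
  cases a with
  | ofNat m =>
    cases b with
    | ofNat n => exact congrArg Int.ofNat (Nat.eq_of_testBit_eq fun i => h i)
    | negSucc n =>
      exfalso
      have h1 : m < 2 ^ (m + n) :=
        lt_of_lt_of_le Nat.lt_two_pow_self (Nat.pow_le_pow_right (by omega) (by omega))
      have h2 : n < 2 ^ (m + n) :=
        lt_of_lt_of_le Nat.lt_two_pow_self (Nat.pow_le_pow_right (by omega) (by omega))
      have hj := h (m + n)
      rw [show (Int.ofNat m).testBit (m + n) = m.testBit (m + n) from rfl,
          show (Int.negSucc n).testBit (m + n) = !n.testBit (m + n) from rfl,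
          Nat.testBit_eq_false_of_lt h1, Nat.testBit_eq_false_of_lt h2] at hj
      simp at hj
  | negSucc m =>
    cases b with
    | ofNat n =>
      exfalso
      have h1 : m < 2 ^ (m + n) :=
        lt_of_lt_of_le Nat.lt_two_pow_self (Nat.pow_le_pow_right (by omega) (by omega))
      have h2 : n < 2 ^ (m + n) :=
        lt_of_lt_of_le Nat.lt_two_pow_self (Nat.pow_le_pow_right (by omega) (by omega))
      have hj := h (m + n)
      rw [show (Int.negSucc m).testBit (m + n) = !m.testBit (m + n) from rfl,
          show (Int.ofNat n).testBit (m + n) = n.testBit (m + n) from rfl,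
          Nat.testBit_eq_false_of_lt h1, Nat.testBit_eq_false_of_lt h2] at hj
      simp at hj
    | negSucc n =>
      refine congrArg Int.negSucc (Nat.eq_of_testBit_eq fun i => ?_)
      have hj := h i
      rw [show (Int.negSucc m).testBit i = !m.testBit i from rfl,
          show (Int.negSucc n).testBit i = !n.testBit i from rfl] at hj
      exact Bool.not_inj hj

lemma pvBxorEq (a b : Int) : PySem.Int.bxor a b = a.xor b := by
  rcases a with m | m <;> rcases b with n | n <;>
    simp [PySem.Int.bxor, Int.xor, Int.negSucc_eq] <;> omega

lemma pvTbBxor (a b : Int) (j : Nat) :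
    (PySem.Int.bxor a b).testBit j = ((a.testBit j) ^^ (b.testBit j)) := by
  rw [pvBxorEq, Int.testBit_lxor]

lemma pvBxorCancel (s a : Int) : PySem.Int.bxor (PySem.Int.bxor s a) a = s := by
  apply pvIntExt
  intro j
  rw [pvTbBxor, pvTbBxor]
  cases s.testBit j <;> cases a.testBit j <;> rfl

lemma pvTbZero (y : Int) : y.testBit 0 = decide (y % 2 = 1) := by
  cases y with
  | ofNat m =>
    rw [show (Int.ofNat m).testBit 0 = m.testBit 0 from rfl, Nat.testBit_zero, pvOfNat]
    exact decide_eq_decide.mpr (by omega)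
  | negSucc m =>
    rw [show (Int.negSucc m).testBit 0 = !m.testBit 0 from rfl, Nat.testBit_zero]
    have h2 : Int.negSucc m = -(↑m) - 1 := by rw [Int.negSucc_eq]; ring
    rcases Nat.mod_two_eq_zero_or_one m with h | h
    · have hx : (Int.negSucc m) % 2 = 1 := by rw [h2]; omega
      simp [h, hx]
    · have hx : ¬((Int.negSucc m) % 2 = 1) := by rw [h2]; omega
      simp [h, hx]

lemma pvTbSucc (y : Int) (j : Nat) : y.testBit (j + 1) = (y / 2).testBit j := by
  cases y with
  | ofNat m =>
    have h1 : Int.ofNat m / 2 = Int.ofNat (m / 2) := by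
      rw [pvOfNat, pvOfNat]; omega
    rw [h1, show (Int.ofNat m).testBit (j + 1) = m.testBit (j + 1) from rfl,
        show (Int.ofNat (m / 2)).testBit j = (m / 2).testBit j from rfl]
    exact Nat.testBit_succ m j
  | negSucc m =>
    have h1 : Int.negSucc m / 2 = Int.negSucc (m / 2) := by rw [Int.negSucc_eq]; omega
    rw [h1, show (Int.negSucc m).testBit (j + 1) = !m.testBit (j + 1) from rfl,
        show (Int.negSucc (m / 2)).testBit j = !(m / 2).testBit j from rfl,
        Nat.testBit_succ]

lemma pvEmodTwoMul (q r m : Int) (h0 : 0 < m) (hr0 : 0 ≤ r) (hr2 : r < 2) :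
    (2 * q + r) % (2 * m) = 2 * (q % m) + r := by
  have hq0 : 0 ≤ q % m := Int.emod_nonneg q (by omega)
  have hq2 : q % m < m := Int.emod_lt_of_pos q h0
  have hd := Int.mul_ediv_add_emod q m
  have h1 : 2 * q + r = 2 * (q % m) + r + 2 * m * (q / m) := by linear_combination (-2 : Int) * hd
  rw [h1, Int.add_mul_emod_self_left]
  exact Int.emod_eq_of_lt (by omega) (by omega)

lemma pvTbEmodPow : ∀ (t : Nat) (y : Int) (j : Nat),
    (y % (2 : Int) ^ t).testBit j = (decide (j < t) && y.testBit j)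
  | 0, y, j => by
    rw [pow_zero, Int.emod_one]
    rw [show ((0 : Int)).testBit j = Nat.testBit 0 j from rfl, Nat.zero_testBit]
    simp
  | (t + 1), y, j => by
    have h2 : (0 : Int) < 2 ^ t := by positivity
    have hr0 : (0 : Int) ≤ y % 2 := by omega
    have hr2 : y % 2 < 2 := by omega
    have key : y % (2 : Int) ^ (t + 1) = 2 * ((y / 2) % 2 ^ t) + y % 2 := by
      calc y % (2 : Int) ^ (t + 1) = (2 * (y / 2) + y % 2) % (2 * 2 ^ t) := by
            rw [show (2 : Int) ^ (t + 1) = 2 * 2 ^ t by ring]; congr 1; omega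
        _ = 2 * ((y / 2) % 2 ^ t) + y % 2 := pvEmodTwoMul (y / 2) (y % 2) (2 ^ t) h2 hr0 hr2
    rcases j with _ | j
    · rw [key, pvTbZero, pvTbZero y]
      simp
    · rw [key, pvTbSucc, pvTbSucc y j,
          show (2 * ((y / 2) % 2 ^ t) + y % 2) / 2 = (y / 2) % 2 ^ t by omega,
          pvTbEmodPow t (y / 2) j]
      have : (j < t) ↔ (j + 1 < t + 1) := by omega
      simp [decide_eq_decide.mpr this]

lemma pvBandTwoPow (j : Nat) (v : Int) :
    PySem.Int.band ((1 : Int) <<< j) v = if v.testBit j then (1 : Int) <<< j else 0 := by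
  rw [pvShl]
  cases v with
  | ofNat n =>
    rw [pvOfNat, PySem.Int.band_natCast, Nat.land_comm, Nat.and_two_pow, pvTbCast]
    cases hn : n.testBit j <;> simp
  | negSucc n =>
    have hb : ¬(0 : Int) ≤ Int.negSucc n := by rw [Int.negSucc_eq]; omega
    have ha : (0 : Int) ≤ ((2 ^ j : Nat) : Int) := by positivity
    rw [show (Int.negSucc n).testBit j = !n.testBit j from rfl]
    unfold PySem.Int.band
    rw [if_pos ha, if_neg hb]
    have ht : (-(Int.negSucc n) - 1).toNat = n := by rw [Int.negSucc_eq]; omega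
    have ht2 : (((2 ^ j : Nat) : Int)).toNat = 2 ^ j := Int.toNat_natCast _
    rw [ht, ht2, Nat.land_comm, Nat.and_two_pow]
    cases hn : n.testBit j <;> simp

lemma pvBandNe (j : Nat) (v : Int) :
    (PySem.Int.band ((1 : Int) <<< j) v ≠ 0) ↔ v.testBit j = true := by
  rw [pvBandTwoPow, pvShl]
  cases hv : v.testBit j <;> simp

lemma pvBandMask (t : Nat) (y : Int) :
    PySem.Int.band y ((1 : Int) <<< t - 1) = y % (2 : Int) ^ t := by
  rw [pvShl]
  have hm : ((2 ^ t : Nat) : Int) - 1 = ((2 ^ t - 1 : Nat) : Int) := by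
    have h1 : 1 ≤ 2 ^ t := Nat.one_le_two_pow
    omega
  rw [hm]
  cases y with
  | ofNat m =>
    rw [show (Int.ofNat m) = ((m : Nat) : Int) from rfl, PySem.Int.band_natCast,
        Nat.and_two_pow_sub_one_eq_mod, Int.natCast_mod]
    push_cast
    rfl
  | negSucc k =>
    have ha : ¬(0 : Int) ≤ Int.negSucc k := by rw [Int.negSucc_eq]; omega
    have hbnn : (0 : Int) ≤ ((2 ^ t - 1 : Nat) : Int) := by positivity
    unfold PySem.Int.band
    rw [if_neg ha, if_pos hbnn]
    have ht : (-(Int.negSucc k) - 1).toNat = k := by rw [Int.negSucc_eq]; omega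
    have ht2 : (((2 ^ t - 1 : Nat) : Int)).toNat = 2 ^ t - 1 := Int.toNat_natCast _
    rw [ht, ht2, Nat.land_comm, Nat.and_two_pow_sub_one_eq_mod]
    have hq : (2 ^ t : Nat) * (k / 2 ^ t) + k % 2 ^ t = k := Nat.div_add_mod k (2 ^ t)
    have hK : k % 2 ^ t < 2 ^ t := Nat.mod_lt _ (Nat.two_pow_pos t)
    have hc : ((2 : Int) ^ t) * ↑(k / 2 ^ t) + ↑(k % 2 ^ t) = (k : Int) := by
      exact_mod_cast congrArg (fun x : Nat => (x : Int)) hq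
    have hpos : (0 : Int) < 2 ^ t := by positivity
    have hKi : ((k % 2 ^ t : Nat) : Int) < 2 ^ t := by exact_mod_cast hK
    have h1 : Int.negSucc k =
        (((2 : Int) ^ t) - 1 - ↑(k % 2 ^ t)) + ((2 : Int) ^ t) * (-(↑(k / 2 ^ t)) - 1) := by
      rw [Int.negSucc_eq]
      linear_combination hc
    have e1 : (Int.negSucc k) % (2 : Int) ^ t
        = (((2 : Int) ^ t) - 1 - ↑(k % 2 ^ t)) % (2 : Int) ^ t := by
      rw [h1]; exact Int.add_mul_emod_self_left _ _ _
    have h4 : (((2 : Int) ^ t) - 1 - ↑(k % 2 ^ t)) % (2 : Int) ^ t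
        = ((2 : Int) ^ t) - 1 - ↑(k % 2 ^ t) := by
      apply Int.emod_eq_of_lt
      · omega
      · omega
    rw [e1, h4]
    have hc2 : ((2 ^ t : Nat) : Int) = (2 : Int) ^ t := by push_cast; ring
    omega

-- parity of the per-bit count equals the bit of the running xor
lemma pvParity (j : Nat) : ∀ (l : List Int) (x0 : Int),
    (l.foldl PySem.Int.bxor x0).testBit j = ((x0.testBit j) ^^ decide (pvCnt l j % 2 = 1))
  | [], x0 => by simp [pvCnt]
  | (a :: l), x0 => by
    rw [List.foldl_cons, pvParity j l (PySem.Int.bxor x0 a), pvTbBxor]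
    unfold pvCnt
    rw [List.countP_cons]
    cases ha : a.testBit j <;>
      rcases Nat.mod_two_eq_zero_or_one (l.countP (fun v => v.testBit j)) with h | h <;>
        simp [h, Nat.add_mod, ha]

-- A's answer loop, after the bitCnt lookups have been rewritten to bits of the running xor
lemma pvAnsFold (x : Int) : ∀ (t : Nat),
    (List.range t).foldl (fun ans j =>
      if x.testBit j = true then ans else PySem.Int.bor ans ((1 : Int) <<< j)) 0
    = Int.not x % (2 : Int) ^ t
  | 0 => by simp
  | (t + 1) => by
    rw [List.range_succ, List.foldl_append, pvAnsFold x t]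
    by_cases hx : x.testBit t = true
    · rw [List.foldl_cons, if_pos hx, List.foldl_nil]
      apply pvIntExt
      intro j
      rw [pvTbEmodPow, pvTbEmodPow]
      have hnot : (Int.not x).testBit t = false := by rw [pvTbNot, hx]; rfl
      by_cases hj : j < t
      · simp [hj, Nat.lt_succ_of_lt hj]
      · by_cases hj2 : j = t
        · subst hj2; simp [hnot]
        · have h3 : ¬ j < t + 1 := by omega
          simp [hj, h3]
    · have hx' : x.testBit t = false := by simpa using hx
      rw [List.foldl_cons, if_neg hx, List.foldl_nil]
      have h0 : (0 : Int) ≤ Int.not x % 2 ^ t := Int.emod_nonneg _ (by positivity)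
      have h1 : (0 : Int) ≤ (1 : Int) <<< t := by rw [pvShl]; positivity
      rw [PySem.Int.bor_of_nonneg h0 h1]
      apply pvIntExt
      intro j
      rw [pvTbCast, Nat.testBit_lor, pvTbEmodPow]
      have ha : (Int.not x % 2 ^ t).toNat.testBit j = (decide (j < t) && (Int.not x).testBit j) := by
        rw [← pvTbCast, Int.toNat_of_nonneg h0, pvTbEmodPow]
      have hb : ((1 : Int) <<< t).toNat.testBit j = decide (t = j) := by
        rw [pvShl, Int.toNat_natCast, Nat.testBit_two_pow]
      rw [ha, hb]
      have hnt : (Int.not x).testBit t = true := by rw [pvTbNot, hx']; rfl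
      by_cases hj : j < t
      · have : ¬ t = j := by omega
        simp [hj, Nat.lt_succ_of_lt hj, this]
      · by_cases hj2 : j = t
        · subst hj2; simp [hnt]
        · have h3 : ¬ j < t + 1 := by omega
          have h4 : ¬ t = j := by omega
          simp [hj, h3, h4]

-- ---- list plumbing ----

lemma pvRangeNat (b : Int) :
    PySem.List.pyRange 0 b = List.map (fun k : Nat => (k : Int)) (List.range b.toNat) := by
  rw [PySem.List.pyRange_one]
  simp only [Int.sub_zero, zero_add]

lemma pvGetMap (g : Nat → Int) (t k : Nat) (h : k < t) :
    PySem.List.pyGetD ((List.range t).map g) (↑k) 0 = g k := by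
  rw [PySem.List.pyGetD_natCast, List.getD_eq_getElem _ _ (by simpa using h)]
  simp

-- the inner counting loop of phase 1
lemma pvCountFoldNe (P : Int → Prop) [DecidablePred P] (k : Nat) :
    ∀ (l : List Int) (c : Int) (bc : List Int), l ≠ [] →
    (l.foldl (fun (p : Int × List Int) v =>
      let cnt := if P v then p.1 + 1 else p.1
      (cnt, p.2.set k cnt)) (c, bc))
    = (c + (l.countP (fun v => decide (P v)) : Int),
       bc.set k (c + (l.countP (fun v => decide (P v)) : Int)))
  | [], _, _, hne => absurd rfl hne
  | (a :: l), c, bc, _ => by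
    rw [List.foldl_cons]
    show (List.foldl (fun (p : Int × List Int) v =>
        let cnt := if P v then p.1 + 1 else p.1
        (cnt, p.2.set k cnt))
        ((if P a then c + 1 else c), bc.set k (if P a then c + 1 else c)) l) = _
    have hc : (if P a then c + 1 else c) + (l.countP (fun v => decide (P v)) : Int)
        = c + ((a :: l).countP (fun v => decide (P v)) : Int) := by
      rw [List.countP_cons]
      by_cases hP : P a
      · simp [hP]
        ring
      · simp [hP]
    rcases l with _ | ⟨b, l⟩
    · have h0 : (if P a then c + 1 else c)
          = c + ((([a] : List Int).countP (fun v => decide (P v)) : Nat) : Int) := by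
        by_cases hP : P a <;> simp [hP] <;> ring
      rw [List.foldl_nil, h0]
    · rw [pvCountFoldNe P k (b :: l) (if P a then c + 1 else c)
            (bc.set k (if P a then c + 1 else c)) (by simp),
          List.set_set, hc]

-- setting each position of a list to a fixed function of its index
lemma pvSetFold (g : Nat → Int) :
    ∀ (b : Nat) (bc : List Int), b ≤ bc.length →
    (List.range b).foldl (fun bc k => bc.set k (g k)) bc
      = (List.range b).map g ++ bc.drop b
  | 0, bc, _ => by simp
  | (b + 1), bc, h => by
    have hb : b < bc.length := by omega
    rw [List.range_succ, List.foldl_append, pvSetFold g b bc (by omega),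
        List.foldl_cons, List.foldl_nil, List.map_append, List.map_cons, List.map_nil,
        List.set_append_right b (g b) (by simp)]
    have hzero : b - ((List.range b).map g).length = 0 := by simp
    rw [hzero, List.drop_eq_getElem_cons hb, List.set_cons_zero]
    simp

-- the decrement loop, as a pointwise map over the table
lemma pvDecrFold (q : Nat → Bool) :
    ∀ (b : Nat) (bc : List Int), b ≤ bc.length →
    (List.range b).foldl (fun bc k =>
        if q k then bc.set k (PySem.List.pyGetD bc (↑k) 0 - 1) else bc) bc
      = (List.range b).map (fun k =>
          if q k then PySem.List.pyGetD bc (↑k) 0 - 1 else PySem.List.pyGetD bc (↑k) 0)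
        ++ bc.drop b
  | 0, bc, _ => by simp
  | (b + 1), bc, h => by
    have hb : b < bc.length := by omega
    rw [List.range_succ, List.foldl_append, pvDecrFold q b bc (by omega),
        List.foldl_cons, List.foldl_nil, List.map_append, List.map_cons, List.map_nil]
    set L := (List.range b).map (fun k =>
        if q k then PySem.List.pyGetD bc (↑k) 0 - 1 else PySem.List.pyGetD bc (↑k) 0) with hL
    have hlen : L.length = b := by simp [hL]
    rw [List.drop_eq_getElem_cons hb]
    have hgetbc : PySem.List.pyGetD bc (↑b) 0 = bc[b] := by
      rw [PySem.List.pyGetD_natCast, List.getD_eq_getElem _ _ hb]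
    have hlen2 : (L ++ bc[b] :: List.drop (b + 1) bc).length = bc.length := by
      simp only [List.length_append, List.length_cons, List.length_drop, hlen]
      omega
    have hget2 : PySem.List.pyGetD (L ++ bc[b] :: List.drop (b + 1) bc) (↑b) 0 = bc[b] := by
      rw [PySem.List.pyGetD_natCast, List.getD_eq_getElem _ _ (by omega),
          List.getElem_append_right (by omega)]
      simp [hlen]
    cases hq : q b
    · simp only [Bool.false_eq_true, if_false]
      rw [hgetbc]
      simp [List.append_assoc]
    · simp only [if_true]
      rw [hget2, hgetbc, List.set_append_right b _ (by omega), hlen, Nat.sub_self,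
          List.set_cons_zero]
      simp [List.append_assoc]

lemma pvConstFold (L : List Nat) (b : List Int) : L.foldl (fun bc _ => bc) b = b := by
  induction L <;> simp [*]

-- phase 1 builds exactly the per-bit counts of nums
lemma pvPhase1Eq (nums : List Int) (mB : Int) :
    pvA_phase1 nums mB = pvPrefCnt nums mB.toNat := by
  simp only [pvA_phase1]
  rw [pvRangeNat mB, List.foldl_map, List.map_map]
  by_cases hnil : nums = []
  · subst hnil
    rw [PySem.List.foldl_congr_mem _ _ (fun bc (_ : Nat) => bc) _ ?_]
    · rw [pvConstFold]
      simp [pvPrefCnt, pvCnt, Function.comp_def]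
    intro bc k _
    simp only [Int.toNat_natCast, Int.shiftLeft_natCast_right]
    rw [PySem.List.foldl_pyRange_zero_pyGetD' ([] : List Int) 0
        (fun (p : Int × List Int) v =>
          ((if PySem.Int.band ((1 : Int) <<< k) v ≠ 0 then p.1 + 1 else p.1),
            p.2.set k
              (if PySem.Int.band ((1 : Int) <<< k) v ≠ 0 then p.1 + 1 else p.1)))
        ((0 : Int), bc)]
    rfl
  · rw [PySem.List.foldl_congr_mem _ _
        (fun bc (k : Nat) => bc.set k ((pvCnt nums k : Nat) : Int)) _ ?_]
    · rw [pvSetFold (fun k => ((pvCnt nums k : Nat) : Int)) mB.toNat _ (by simp)]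
      unfold pvPrefCnt
      simp
    intro bc k _
    simp only [Int.toNat_natCast, Int.shiftLeft_natCast_right]
    rw [PySem.List.foldl_pyRange_zero_pyGetD' nums 0
        (fun (p : Int × List Int) v =>
          ((if PySem.Int.band ((1 : Int) <<< k) v ≠ 0 then p.1 + 1 else p.1),
            p.2.set k
              (if PySem.Int.band ((1 : Int) <<< k) v ≠ 0 then p.1 + 1 else p.1)))
        ((0 : Int), bc)]
    rw [show (fun (p : Int × List Int) v =>
          ((if PySem.Int.band ((1 : Int) <<< k) v ≠ 0 then p.1 + 1 else p.1),
            p.2.set k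
              (if PySem.Int.band ((1 : Int) <<< k) v ≠ 0 then p.1 + 1 else p.1)))
        = (fun (p : Int × List Int) v =>
            let cnt := if PySem.Int.band ((1 : Int) <<< k) v ≠ 0 then p.1 + 1 else p.1
            (cnt, p.2.set k cnt)) from rfl,
        pvCountFoldNe (fun v => PySem.Int.band ((1 : Int) <<< k) v ≠ 0)
          k nums 0 bc hnil]
    have hcn : (nums.countP
          (fun v => decide (PySem.Int.band ((1 : Int) <<< k) v ≠ 0)))
        = pvCnt nums k := by
      unfold pvCnt
      apply List.countP_congr
      intro v _
      simpa using pvBandNe k v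
    rw [hcn]
    simp

-- the answer loop on the count table of a prefix
lemma pvAnsEq (pre : List Int) (mB : Int) :
    pvA_ans (pvPrefCnt pre mB.toNat) mB = pvAnsOf pre mB.toNat := by
  unfold pvA_ans
  rw [pvRangeNat, List.foldl_map]
  rw [PySem.List.foldl_congr_mem _ _
      (fun ans (j : Nat) => if (pvXorAll pre).testBit j = true then ans
        else PySem.Int.bor ans ((1 : Int) <<< j)) 0 ?_]
  · exact pvAnsFold (pvXorAll pre) mB.toNat
  intro acc k hk
  rw [List.mem_range] at hk
  simp only [Int.toNat_natCast]
  unfold pvPrefCnt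
  rw [pvGetMap _ _ _ hk]
  have hmod : PySem.Int.mod ((pvCnt pre k : Nat) : Int) 2 = ((pvCnt pre k % 2 : Nat) : Int) := by
    exact_mod_cast PySem.Int.mod_natCast (pvCnt pre k) 2
  rw [hmod]
  have hp := pvParity k pre 0
  rw [show ((0 : Int)).testBit k = Nat.testBit 0 k from rfl, Nat.zero_testBit, Bool.false_xor] at hp
  have hbit : (((pvCnt pre k % 2 : Nat) : Int) ≠ 0) ↔ ((pvXorAll pre).testBit k = true) := by
    rw [show (pvXorAll pre) = pre.foldl PySem.Int.bxor 0 from rfl, hp, decide_eq_true_eq]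
    omega
  rw [if_congr hbit rfl rfl]

-- the decrement loop removes the last element of the prefix from the table
lemma pvDecrEq (pre : List Int) (a : Int) (mB : Int) :
    pvA_decr (pvPrefCnt (pre ++ [a]) mB.toNat) a mB = pvPrefCnt pre mB.toNat := by
  unfold pvA_decr
  rw [pvRangeNat, List.foldl_map]
  rw [PySem.List.foldl_congr_mem _ _
      (fun bc (k : Nat) => if a.testBit k then bc.set k (PySem.List.pyGetD bc (↑k) 0 - 1) else bc) _ ?_]
  · rw [pvDecrFold (fun k => a.testBit k) mB.toNat _ (by unfold pvPrefCnt; simp)]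
    rw [List.drop_eq_nil_of_le (by unfold pvPrefCnt; simp), List.append_nil]
    unfold pvPrefCnt
    apply List.map_congr_left
    intro k hk
    rw [List.mem_range] at hk
    rw [pvGetMap _ _ _ hk]
    have hcnt : pvCnt (pre ++ [a]) k = pvCnt pre k + (if a.testBit k then 1 else 0) := by
      unfold pvCnt
      rw [List.countP_append]
      cases hak : a.testBit k <;> simp [hak]
    cases hak : a.testBit k <;> simp [hak, hcnt]
  intro bc k _
  simp only [Int.toNat_natCast, Int.shiftLeft_natCast_right]
  have hbn : (PySem.Int.band a ((1 : Int) <<< k) ≠ 0) ↔ (a.testBit k = true) := by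
    rw [PySem.Int.band_comm]; exact pvBandNe k a
  rw [if_congr hbn rfl rfl]

-- phase 2 invariant
lemma pvPhase2 (nums : List Int) (mB : Int) :
    ∀ (i : Nat), i ≤ nums.length →
    ((List.range i).foldl (fun (st : List Int × List Int) (k : Nat) =>
        (pvA_decr st.1 (PySem.List.pyGetD nums ((nums.length : Int) - 1 - ((k : Int))) 0) mB,
         st.2 ++ [pvA_ans st.1 mB])) (pvPrefCnt nums mB.toNat, []))
    = (pvPrefCnt (nums.take (nums.length - i)) mB.toNat,
       (List.range i).map (fun k => pvAnsOf (nums.take (nums.length - k)) mB.toNat))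
  | 0, _ => by simp
  | (i + 1), h => by
    have hi : i < nums.length := by omega
    rw [List.range_succ, List.foldl_append, pvPhase2 nums mB i (by omega),
        List.foldl_cons, List.foldl_nil, List.map_append, List.map_cons, List.map_nil]
    simp only []
    have hv : PySem.List.pyGetD nums ((nums.length : Int) - 1 - ((i : Int))) 0
        = nums[nums.length - i - 1]'(by omega) := by
      rw [PySem.List.pyGetD_eq_getElem _ 0 (by omega) (by omega)]
      have hidx : (((nums.length : Int)) - 1 - ((i : Int))).toNat = nums.length - i - 1 := by
        omega
      simp only [hidx]
    have htake1 : nums.take ((nums.length - i - 1) + 1)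
        = nums.take (nums.length - i - 1) ++ [nums[nums.length - i - 1]'(by omega)] := by
      rw [List.take_add_one, List.getElem?_eq_getElem (by omega)]
      rfl
    have htake : nums.take (nums.length - i)
        = nums.take (nums.length - i - 1) ++ [nums[nums.length - i - 1]'(by omega)] := by
      conv_lhs => rw [show nums.length - i = (nums.length - i - 1) + 1 from by omega]
      exact htake1
    have hd : pvA_decr (pvPrefCnt (nums.take (nums.length - i)) mB.toNat)
          (nums[nums.length - i - 1]'(by omega)) mB
        = pvPrefCnt (nums.take (nums.length - (i + 1))) mB.toNat := by
      rw [htake, pvDecrEq,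
          show nums.length - (i + 1) = nums.length - i - 1 from by omega]
    rw [hv, hd, pvAnsEq]

theorem pvAeq (nums : List Int) (mB : Int) :
    getMaximumXor nums mB = pvSpecList nums mB.toNat := by
  simp only [getMaximumXor]
  rw [pvPhase1Eq, pvRangeNat, Int.toNat_natCast, List.foldl_map]
  rw [pvPhase2 nums mB nums.length le_rfl]
  unfold pvSpecList
  rfl

-- ---- B side ----

lemma pvFoldRevCancel : ∀ (w : List Int) (s : Int),
    w.reverse.foldl PySem.Int.bxor (w.foldl PySem.Int.bxor s) = s
  | [], s => by simp
  | (a :: w), s => by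
    have h1 : (a :: w).foldl PySem.Int.bxor s = w.foldl PySem.Int.bxor (PySem.Int.bxor s a) :=
      rfl
    rw [List.reverse_cons, List.foldl_append, h1, pvFoldRevCancel w (PySem.Int.bxor s a),
        List.foldl_cons, List.foldl_nil]
    exact pvBxorCancel s a

lemma pvXorRevTake (l : List Int) (i : Nat) :
    (l.reverse.take i).foldl PySem.Int.bxor (pvXorAll l)
      = pvXorAll (l.take (l.length - i)) := by
  rw [List.take_reverse]
  have hsplit : pvXorAll l
      = (l.drop (l.length - i)).foldl PySem.Int.bxor (pvXorAll (l.take (l.length - i))) := by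
    unfold pvXorAll
    conv_lhs => rw [← List.take_append_drop (l.length - i) l]
    rw [List.foldl_append]
  rw [hsplit, pvFoldRevCancel]

lemma pvBLoop (mask : Int) : ∀ (rl : List Int) (x : Int) (acc : List Int),
    (rl.foldl (fun (st : Int × List Int) v =>
      (PySem.Int.bxor st.1 v, st.2 ++ [PySem.Int.band (Int.not st.1) mask])) (x, acc)).2
    = acc ++ (List.range rl.length).map (fun i =>
        PySem.Int.band (Int.not ((rl.take i).foldl PySem.Int.bxor x)) mask)
  | [], x, acc => by simp
  | (v :: rl), x, acc => by
    rw [List.foldl_cons, pvBLoop mask rl (PySem.Int.bxor x v) (acc ++ [PySem.Int.band (Int.not x) mask])]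
    rw [List.length_cons, List.range_succ_eq_map, List.map_cons, List.map_map]
    simp only [List.take_zero, List.foldl_nil, List.append_assoc, List.singleton_append]
    rfl

theorem pvBeq (nums : List Int) (mB : Int) :
    getMaximumXor_alt nums mB = pvSpecList nums mB.toNat := by
  simp only [getMaximumXor_alt]
  rw [pvBLoop]
  rw [List.nil_append, List.length_reverse]
  unfold pvSpecList
  apply List.map_congr_left
  intro i hi
  rw [List.mem_range] at hi
  rw [show nums.foldl (fun a v => PySem.Int.bxor a v) 0 = pvXorAll nums from rfl]
  rw [pvXorRevTake nums i]
  have hmask : (if 0 < mB then ((1 : Int) <<< mB.toNat) - 1 else 0)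
      = (1 : Int) <<< mB.toNat - 1 := by
    by_cases h : 0 < mB
    · simp [h]
    · rw [if_neg h, show mB.toNat = 0 by omega, pvShl]
      simp
  rw [hmask, pvBandMask]
  rfl

-- ===== VERDICT (by name: the statement is the Claim_ definition above) =====
theorem getMaximumXor_spec : Claim_equal_getMaximumXor := by
  intro nums mB _
  unfold Spec_getMaximumXor
  rw [pvAeq, pvBeq]
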